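-- pv_equiv track=rewrite | github.com/sejongmin/Python_study | 백준/Silver/2531. 회전 초밥/회전 초밥.py | solution
-- ===== SOURCE A (Python) =====
-- from collections import deque
--
-- def solution(N: int, d: int, k: int, c: int, dishes: list) -> int:
--     answer = 0
--     eat = deque([dishes[i] for i in range(N - k + 1, N)])
--
--     for i in range(N):
--         eat.append(dishes[i])
--         res = 0
--         kind = set(eat)
--         if c not in kind:
--             res += 1
--         res += len(kind)
--         answer = max(answer, res)
--         eat.popleft()
--
--     return answer
-- ===== SOURCE B (Python) =====
-- def solution(N: int, d: int, k: int, c: int, dishes: list) -> int: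
--     # O(N + k): sliding window over the circular sequence with an incremental
--     # frequency dict and a running distinct-kind count (A recounts set(window) each step).
--     seed = [dishes[j] for j in range(N - k + 1, N)]
--     tail = [dishes[j] for j in range(N)]
--     ext = seed + tail
--     cnt = {}
--     distinct = 0
--     for x in seed:
--         if cnt.get(x, 0) == 0:
--             distinct += 1
--         cnt[x] = cnt.get(x, 0) + 1
--     answer = 0
--     for i, x in enumerate(tail):
--         if cnt.get(x, 0) == 0:
--             distinct += 1
--         cnt[x] = cnt.get(x, 0) + 1
--         res = distinct + (0 if cnt.get(c, 0) > 0 else 1)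
--         if res > answer:
--             answer = res
--         y = ext[i]
--         cnt[y] = cnt.get(y, 0) - 1
--         if cnt.get(y, 0) == 0:
--             distinct -= 1
--     return answer
-- ===== Notes on version B (the rewrite author's own statement) =====
-- stated objective: faster
-- what changed: Replaces A's per-step rebuild of set(window) over the k-element deque by a single sliding-window pass that maintains a frequency dict and a running distinct-kind counter, updated incrementally as one dish enters and one leaves.
import Mathlib
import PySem

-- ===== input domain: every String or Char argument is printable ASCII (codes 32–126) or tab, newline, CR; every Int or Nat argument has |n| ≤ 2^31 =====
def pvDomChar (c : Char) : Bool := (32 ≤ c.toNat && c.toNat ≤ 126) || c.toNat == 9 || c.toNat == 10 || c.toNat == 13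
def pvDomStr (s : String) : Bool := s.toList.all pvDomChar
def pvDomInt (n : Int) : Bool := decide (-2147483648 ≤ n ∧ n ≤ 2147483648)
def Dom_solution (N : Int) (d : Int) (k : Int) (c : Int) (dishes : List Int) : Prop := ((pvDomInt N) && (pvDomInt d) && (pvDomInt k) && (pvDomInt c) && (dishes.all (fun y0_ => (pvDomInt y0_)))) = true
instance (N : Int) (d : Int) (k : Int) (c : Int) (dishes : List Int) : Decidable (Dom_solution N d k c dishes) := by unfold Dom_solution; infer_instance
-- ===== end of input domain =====

-- B replaces A's per-window set(...) recount by an incremental frequency-dict sliding window (O(N+k) vs O(N*k)).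
-- A mutates no argument; the deque 'eat' is local (ported as a List with append / drop 1 for popleft).

-- ===== PORT A =====
-- the body of A's loop: append dishes[i], recount kinds via set(eat), take the max, popleft
def eatStep (c : Int) (st : List Int × Int) (x : Int) : List Int × Int :=
  let eat := st.1 ++ [x]
  let kind := PySem.Set.ofList eat
  let res : Int := (if kind.contains c then 0 else 1) + PySem.List.len kind
  (eat.drop 1, max st.2 res)

def solution (N : Int) (d : Int) (k : Int) (c : Int) (dishes : List Int) : Int :=
  let eat : List Int := (PySem.List.pyRange (N - k + 1) N 1).map (fun i => PySem.List.pyGetD dishes i 0)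
  ((PySem.List.pyRange 0 N 1).foldl
      (fun st i => eatStep c st (PySem.List.pyGetD dishes i 0)) (eat, 0)).2

-- ===== PORT B =====
-- 'if cnt.get(x,0)==0: distinct += 1 ; cnt[x] = cnt.get(x,0)+1' (shared by B's two loops)
def cntAdd (s : PySem.Dict Int Int × Int) (x : Int) : PySem.Dict Int Int × Int :=
  (s.1.insert x (s.1.getD x 0 + 1), if s.1.getD x 0 = 0 then s.2 + 1 else s.2)

-- body of B's main loop over enumerate(tail): dish enters, answer updated, dish ext[i] leaves
def winStep (c : Int) (ext : List Int) (st : PySem.Dict Int Int × Int × Int) (p : Int × Int) :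
    PySem.Dict Int Int × Int × Int :=
  let s1 := cntAdd (st.1, st.2.1) p.2
  let res : Int := s1.2 + (if s1.1.getD c 0 > 0 then 0 else 1)
  let ans1 := if res > st.2.2 then res else st.2.2
  let y := PySem.List.pyGetD ext p.1 0
  let cnt2 := s1.1.insert y (s1.1.getD y 0 - 1)
  let dist2 := if cnt2.getD y 0 = 0 then s1.2 - 1 else s1.2
  (cnt2, dist2, ans1)

def solution_alt (N : Int) (d : Int) (k : Int) (c : Int) (dishes : List Int) : Int :=
  let seed : List Int := (PySem.List.pyRange (N - k + 1) N 1).map (fun j => PySem.List.pyGetD dishes j 0)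
  let tail : List Int := (PySem.List.pyRange 0 N 1).map (fun j => PySem.List.pyGetD dishes j 0)
  let ext := seed ++ tail
  let s0 := seed.foldl cntAdd (PySem.Dict.empty, 0)
  ((PySem.List.enumerate tail 0).foldl (winStep c ext) (s0.1, s0.2, 0)).2.2

-- ===== PRECONDITION & SPEC =====
-- exactly the inputs where A returns: every index of the two comprehensions is a valid
-- (possibly negative) Python index into dishes, else A raises IndexError
def Pre_solution (N : Int) (d : Int) (k : Int) (c : Int) (dishes : List Int) : Prop :=
  (0 < N → N ≤ (dishes.length : Int)) ∧ (1 < k → -(dishes.length : Int) ≤ N - k + 1)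
instance (N : Int) (d : Int) (k : Int) (c : Int) (dishes : List Int) : Decidable (Pre_solution N d k c dishes) := by unfold Pre_solution; infer_instance

def pvWitness_solution : Int × Int × Int × Int × List Int := (3, 3, 2, 2, [1, 2, 3])

def Spec_solution (N : Int) (d : Int) (k : Int) (c : Int) (dishes : List Int) (out : Int) : Prop := out = solution_alt N d k c dishes
instance (N : Int) (d : Int) (k : Int) (c : Int) (dishes : List Int) (out : Int) : Decidable (Spec_solution N d k c dishes out) := by unfold Spec_solution; infer_instance

-- ===== CLAIM (what is proved, stated in full; the proofs are below) =====
def Claim_equal_solution : Prop := ∀ (N : Int) (d : Int) (k : Int) (c : Int) (dishes : List Int), Dom_solution N d k c dishes → Pre_solution N d k c dishes → Spec_solution N d k c dishes (solution N d k c dishes)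

-- ===== LEMMAS AND PROOFS =====

lemma int_max_eq (a r : Int) : max a r = if r > a then r else a := by
  rw [max_def]; split_ifs <;> omega

lemma card_snoc (l : List Int) (x : Int) :
    (l ++ [x]).toFinset.card = if x ∈ l then l.toFinset.card else l.toFinset.card + 1 := by
  rw [List.toFinset_append]
  simp only [List.toFinset_cons, List.toFinset_nil, insert_empty_eq]
  rw [Finset.union_comm, ← Finset.insert_eq]
  split_ifs with h
  · rw [Finset.insert_eq_self.2 (List.mem_toFinset.2 h)]
  · rw [Finset.card_insert_of_notMem (by simpa using h)]

lemma card_cons (h : Int) (t : List Int) :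
    (h :: t).toFinset.card = if h ∈ t then t.toFinset.card else t.toFinset.card + 1 := by
  rw [List.toFinset_cons]
  split_ifs with hm
  · rw [Finset.insert_eq_self.2 (List.mem_toFinset.2 hm)]
  · rw [Finset.card_insert_of_notMem (by simpa using hm)]

lemma setLen_eq_card (l : List Int) : (PySem.Set.ofList l).length = l.toFinset.card := by
  have h1 : (PySem.Set.ofList l).toFinset = l.toFinset := by
    apply Finset.ext; intro a; simp [PySem.Set.mem_ofList]
  rw [← h1, List.toFinset_card_of_nodup (PySem.Set.nodup_ofList l)]

-- entering dish: the frequency dict keeps counting the window and distinct keeps its kind count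

lemma cntAdd_inv (cnt : PySem.Dict Int Int) (dist : Int) (eat : List Int) (x : Int)
    (h1 : ∀ z, cnt.getD z 0 = (eat.count z : Int)) (h2 : dist = (eat.toFinset.card : Int)) :
    (∀ z, (cntAdd (cnt, dist) x).1.getD z 0 = ((eat ++ [x]).count z : Int)) ∧
      (cntAdd (cnt, dist) x).2 = ((eat ++ [x]).toFinset.card : Int) := by
  have hx : x ∈ eat ↔ ¬ ((eat.count x : Int) = 0) := by
    rw [Int.natCast_eq_zero, List.count_eq_zero]; tauto
  constructor
  · intro z
    show (cnt.insert x (cnt.getD x 0 + 1)).getD z 0 = _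
    rw [PySem.Dict.getD_insert]
    rcases eq_or_ne z x with rfl | hz
    · simp [h1, List.count_append]
    · rw [if_neg hz, h1, List.count_append]
      have : List.count z [x] = 0 := by simp [List.count_singleton]; exact fun h => hz h.symm
      omega
  · show (if cnt.getD x 0 = 0 then dist + 1 else dist) = _
    rw [card_snoc, h1 x]
    split_ifs with ha hb hb
    · exact absurd hb (by rw [hx] at *; omega)
    · omega
    · omega
    · exact absurd (hx.2 (by omega)) hb

-- leaving dish (the head of the window): counts and distinct drop to those of the tail

lemma cntSub_inv (cnt : PySem.Dict Int Int) (dist : Int) (h0 : Int) (t : List Int)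
    (h1 : ∀ z, cnt.getD z 0 = ((h0 :: t).count z : Int)) (h2 : dist = ((h0 :: t).toFinset.card : Int)) :
    (∀ z, (cnt.insert h0 (cnt.getD h0 0 - 1)).getD z 0 = (t.count z : Int)) ∧
      ((if (cnt.insert h0 (cnt.getD h0 0 - 1)).getD h0 0 = 0 then dist - 1 else dist)
        = (t.toFinset.card : Int)) := by
  have hh : ∀ z, (cnt.insert h0 (cnt.getD h0 0 - 1)).getD z 0 = (t.count z : Int) := by
    intro z
    rw [PySem.Dict.getD_insert]
    rcases eq_or_ne z h0 with rfl | hz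
    · rw [if_pos rfl, h1]; simp [List.count_cons_self]
    · rw [if_neg hz, h1, List.count_cons_of_ne (fun h => hz h.symm)]
  refine ⟨hh, ?_⟩
  rw [hh h0, h2, card_cons]
  have hm : h0 ∈ t ↔ ¬ ((t.count h0 : Int) = 0) := by
    rw [Int.natCast_eq_zero, List.count_eq_zero]; tauto
  split_ifs with ha hb hb
  · exact absurd hb (by rw [hm] at *; omega)
  · omega
  · omega
  · exact absurd (hm.2 (by omega)) hb

-- the two per-window scores coincide: set-recount = running distinct, both bonuses test c ∈ window

lemma res_eq (cnt1 : PySem.Dict Int Int) (w : List Int) (c : Int)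
    (h1 : ∀ z, cnt1.getD z 0 = (w.count z : Int)) :
    (if (PySem.Set.ofList w).contains c then 0 else 1) + PySem.List.len (PySem.Set.ofList w)
      = (w.toFinset.card : Int) + (if cnt1.getD c 0 > 0 then 0 else 1) := by
  have hc : (PySem.Set.ofList w).contains c = true ↔ c ∈ w := by
    rw [PySem.Set.contains_iff, PySem.Set.mem_ofList]
  have hb : cnt1.getD c 0 > 0 ↔ c ∈ w := by
    rw [h1 c]; constructor
    · intro h; exact List.count_pos_iff.1 (by exact_mod_cast h)
    · intro h; exact_mod_cast List.count_pos_iff.2 h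
  have hl : PySem.List.len (PySem.Set.ofList w) = (w.toFinset.card : Int) := by
    rw [PySem.List.len_eq, setLen_eq_card]
  rw [hl]
  split_ifs with p q q <;> first | omega | exact absurd (hb.2 (hc.1 p)) q | exact absurd (hc.2 (hb.1 q)) (by simpa using p)

lemma sim (c : Int) (ext : List Int) : ∀ (rest : List Int) (j : ℕ) (eat : List Int)
    (cnt : PySem.Dict Int Int) (dist ansA ansB : Int),
    ext.drop j = eat ++ rest →
    (∀ x, cnt.getD x 0 = (eat.count x : Int)) →
    dist = (eat.toFinset.card : Int) →
    ansA = ansB →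
    (rest.foldl (eatStep c) (eat, ansA)).2
      = ((PySem.List.enumerate rest (j : Int)).foldl (winStep c ext) (cnt, dist, ansB)).2.2 := by
  intro rest
  induction rest with
  | nil => intro j eat cnt dist ansA ansB _ _ _ h4; simpa [PySem.List.enumerate_nil] using h4
  | cons x rest' ih =>
    intro j eat cnt dist ansA ansB hdrop h1 h2 h4
    obtain ⟨h0, t, ht⟩ : ∃ h0 t, eat ++ [x] = h0 :: t := by
      cases eat with
      | nil => exact ⟨x, [], rfl⟩
      | cons a l => exact ⟨a, l ++ [x], rfl⟩
    have hdrop' : ext.drop j = (eat ++ [x]) ++ rest' := by rw [hdrop]; simp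
    have hjlt : j < ext.length := by
      have hlen := congrArg List.length hdrop'
      rw [List.length_drop, ht] at hlen
      simp at hlen; omega
    -- the dish that leaves is the head of the current window
    have hy : PySem.List.pyGetD ext (j : Int) 0 = h0 := by
      rw [PySem.List.pyGetD_natCast]
      have hg : ext[j]? = some h0 := by
        have : (ext.drop j)[0]? = some h0 := by rw [hdrop', ht]; rfl
        simpa [List.getElem?_drop] using this
      rw [List.getD_eq_getElem?_getD, hg]; rfl
    obtain ⟨ha1, ha2⟩ := cntAdd_inv cnt dist eat x h1 h2
    rw [ht] at ha1 ha2
    obtain ⟨hs1, hs2⟩ := cntSub_inv (cntAdd (cnt, dist) x).1 (cntAdd (cnt, dist) x).2 h0 t ha1 ha2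
    have hdropS : ext.drop (j + 1) = t ++ rest' := by
      have h5 := congrArg (List.drop 1) hdrop'
      rw [List.drop_drop, ht] at h5
      simpa [Nat.add_comm] using h5
    have hres : (if (PySem.Set.ofList (eat ++ [x])).contains c then 0 else 1)
          + PySem.List.len (PySem.Set.ofList (eat ++ [x]))
        = (cntAdd (cnt, dist) x).2 + (if (cntAdd (cnt, dist) x).1.getD c 0 > 0 then 0 else 1) := by
      rw [show eat ++ [x] = h0 :: t from ht]
      rw [res_eq (cntAdd (cnt, dist) x).1 (h0 :: t) c ha1, ha2]
    -- one step of each loop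
    rw [PySem.List.enumerate_cons, List.foldl_cons, List.foldl_cons]
    have hAstep : eatStep c (eat, ansA) x
        = (t, max ansA ((if (PySem.Set.ofList (eat ++ [x])).contains c then 0 else 1)
            + PySem.List.len (PySem.Set.ofList (eat ++ [x])))) := by
      simp only [eatStep, ht]; rfl
    have hBstep : winStep c ext (cnt, dist, ansB) ((j : Int), x)
        = ((cntAdd (cnt, dist) x).1.insert h0 ((cntAdd (cnt, dist) x).1.getD h0 0 - 1),
           (if ((cntAdd (cnt, dist) x).1.insert h0 ((cntAdd (cnt, dist) x).1.getD h0 0 - 1)).getD h0 0 = 0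
              then (cntAdd (cnt, dist) x).2 - 1 else (cntAdd (cnt, dist) x).2),
           (if ((cntAdd (cnt, dist) x).2 + (if (cntAdd (cnt, dist) x).1.getD c 0 > 0 then 0 else 1)) > ansB
              then ((cntAdd (cnt, dist) x).2 + (if (cntAdd (cnt, dist) x).1.getD c 0 > 0 then 0 else 1))
              else ansB)) := by
      simp only [winStep, hy]
    rw [hAstep, hBstep]
    have hcast : (j : Int) + 1 = ((j + 1 : ℕ) : Int) := by push_cast; ring
    rw [hcast]
    exact ih (j + 1) t _ _ _ _ hdropS hs1 hs2 (by rw [hres, h4, int_max_eq])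

lemma seed_inv (l : List Int) : ∀ (cnt : PySem.Dict Int Int) (dist : Int) (pref : List Int),
    (∀ x, cnt.getD x 0 = (pref.count x : Int)) → dist = (pref.toFinset.card : Int) →
    (∀ x, (l.foldl cntAdd (cnt, dist)).1.getD x 0 = ((pref ++ l).count x : Int)) ∧
      (l.foldl cntAdd (cnt, dist)).2 = ((pref ++ l).toFinset.card : Int) := by
  induction l with
  | nil => intro cnt dist pref h1 h2; simpa using ⟨h1, h2⟩
  | cons x l ih =>
    intro cnt dist pref h1 h2
    obtain ⟨p1, p2⟩ := cntAdd_inv cnt dist pref x h1 h2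
    have := ih (cntAdd (cnt, dist) x).1 (cntAdd (cnt, dist) x).2 (pref ++ [x]) p1 p2
    simpa [List.append_assoc] using this

-- ===== VERDICT (by name: the statement is the Claim_ definition above) =====
theorem solution_spec : Claim_equal_solution := by
  intro N d k c dishes _ _
  unfold Spec_solution solution solution_alt
  dsimp only
  rw [← List.foldl_map]
  set seed : List Int := (PySem.List.pyRange (N - k + 1) N 1).map (fun j => PySem.List.pyGetD dishes j 0) with hseed
  set tail : List Int := (PySem.List.pyRange 0 N 1).map (fun j => PySem.List.pyGetD dishes j 0) with htail
  have h0 := seed_inv seed PySem.Dict.empty 0 [] (by simp [PySem.Dict.getD_empty]) (by simp)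
  simp only [List.nil_append] at h0
  have := sim c (seed ++ tail) tail 0 seed
    (seed.foldl cntAdd (PySem.Dict.empty, 0)).1 (seed.foldl cntAdd (PySem.Dict.empty, 0)).2 0 0
    (by simp) h0.1 h0.2 rfl
  simpa using this
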